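-- pv_equiv track=rewrite | github.com/alibinauanov/ticket_booking | main.py | escape_single_quotes
-- ===== SOURCE A (Python) =====
-- def escape_single_quotes(x):
--     """
--     Escapes single quotes in a string to prevent SQL errors or injection attacks.
--
--     Args:
--         x (str): The input string to sanitize.
--
--     Returns:
--         str: A sanitized string with all single quotes escaped (replaced with two single quotes).
--
--     Notes:
--         - Useful for handling user inputs such as names or form fields that may contain single quotes.
--         - Ensures compatibility with SQL queries by escaping characters correctly.
--     """
--     assert type(x) == str
--     if "'" not in x:
--         return x
--     db_x = ''
--     for i in x:
--         if i == "'":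
--             db_x += "''"
--         else:
--             db_x += i
--     return db_x
-- ===== SOURCE B (Python) =====
-- def escape_single_quotes(x):
--     assert type(x) == str
--     return "''".join(x.split("'"))
-- ===== Notes on version B (the rewrite author's own statement) =====
-- stated objective: idiomatic
-- what changed: B partitions the string into the segments between single quotes via str.split and rejoins them with a doubled-quote separator, instead of A's character-by-character scan with branching and string accumulation.
import Mathlib
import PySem

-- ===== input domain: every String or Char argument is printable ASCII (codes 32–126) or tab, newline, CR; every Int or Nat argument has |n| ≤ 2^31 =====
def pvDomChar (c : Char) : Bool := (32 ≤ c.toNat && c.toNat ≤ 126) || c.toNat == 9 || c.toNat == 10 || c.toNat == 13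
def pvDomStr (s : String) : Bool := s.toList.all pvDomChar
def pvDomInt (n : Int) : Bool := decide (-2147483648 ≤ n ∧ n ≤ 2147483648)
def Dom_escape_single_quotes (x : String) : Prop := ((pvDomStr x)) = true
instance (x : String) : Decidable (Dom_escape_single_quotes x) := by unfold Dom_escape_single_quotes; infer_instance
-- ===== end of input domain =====

-- B rejoins the split-on-quote segments with a doubled-quote separator instead of A's per-character accumulation; proved equal on all printable-ASCII strings.


-- ===== PORT A =====
-- the 'assert type(x) == str' always succeeds under the type convention;
-- 'db_x += …' is ported as a List Char accumulator (Lean's String.append is opaque), packed with String.ofList at the end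
def escape_single_quotes (x : String) : String :=
  if PySem.Str.isIn "'" x = false then x
  else String.ofList (x.toList.foldl (fun db c => db ++ (if c = '\'' then ['\'', '\''] else [c])) [])

-- ===== PORT B =====
-- "''".join(x.split("'")); Chars.splitOn is PySem's sep ≠ "" split, Chars.join is str.join
def escape_single_quotes_alt (x : String) : String :=
  String.ofList (PySem.Chars.join ['\'', '\''] (PySem.Chars.splitOn x.toList ['\'']))

-- ===== PRECONDITION & SPEC =====
def Spec_escape_single_quotes (x : String) (out : String) : Prop := out = escape_single_quotes_alt x
instance (x : String) (out : String) : Decidable (Spec_escape_single_quotes x out) := by unfold Spec_escape_single_quotes; infer_instance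

-- ===== CLAIM (what is proved, stated in full; the proofs are below) =====
def Claim_equal_escape_single_quotes : Prop := ∀ (x : String), Dom_escape_single_quotes x → Spec_escape_single_quotes x (escape_single_quotes x)

-- ===== LEMMAS AND PROOFS =====

-- the escaped string as a flatMap
def pvEsc (cs : List Char) : List Char :=
  cs.flatMap (fun c => if c = '\'' then ['\'', '\''] else [c])

-- simple structural version of splitOn's fuel loop (proof-side only)
def pvSp : List Char → List Char → List (List Char)
  | [], cur => [cur.reverse]
  | c :: rest, cur => if c = '\'' then cur.reverse :: pvSp rest [] else pvSp rest (c :: cur)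

theorem pvSp_ne_nil (l cur : List Char) : pvSp l cur ≠ [] := by
  induction l generalizing cur with
  | nil => simp [pvSp]
  | cons c rest ih => simp only [pvSp]; split_ifs <;> simp [ih]

theorem go_eq_pvSp (fuel : Nat) (l cur : List Char) (acc : List (List Char)) (h : l.length ≤ fuel) :
    PySem.Chars.splitOn.go ['\''] fuel l cur acc = acc.reverse ++ pvSp l cur := by
  induction fuel generalizing l cur acc with
  | zero =>
    have hl : l = [] := by cases l <;> simp_all
    subst hl; rw [PySem.Chars.splitOn.go]; simp [pvSp]
  | succ fuel ih =>
    cases l with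
    | nil => rw [PySem.Chars.splitOn.go] <;> simp [pvSp]
    | cons c rest =>
      rw [PySem.Chars.splitOn.go]
      by_cases hc : c = '\''
      · subst hc
        rw [if_pos (by simp [List.isPrefixOf])]
        rw [ih _ _ _ (by simpa using Nat.le_of_succ_le_succ h)]
        simp [pvSp]
      · rw [if_neg (by simp [List.isPrefixOf]; exact fun h => hc h.symm)]
        rw [ih _ _ _ (by simpa using Nat.le_of_succ_le_succ h)]
        simp [pvSp, hc]

theorem join_pvSp (l cur : List Char) :
    PySem.Chars.join ['\'', '\''] (pvSp l cur) = cur.reverse ++ pvEsc l := by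
  induction l generalizing cur with
  | nil => simp [pvSp, pvEsc, PySem.Chars.join, List.intercalate]
  | cons c rest ih =>
    by_cases hc : c = '\''
    · subst hc
      simp only [pvSp, if_true]
      obtain ⟨p, t, hpt⟩ : ∃ p t, pvSp rest [] = p :: t := by
        cases hs : pvSp rest [] with
        | nil => exact absurd hs (pvSp_ne_nil rest [])
        | cons p t => exact ⟨p, t, rfl⟩
      have hj := ih (cur := [])
      rw [hpt] at hj ⊢
      rw [PySem.Chars.join_cons_cons, hj]
      simp [pvEsc]
    · simp only [pvSp, if_neg hc, ih]
      simp [pvEsc, hc]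

theorem join_splitOn (cs : List Char) :
    PySem.Chars.join ['\'', '\''] (PySem.Chars.splitOn cs ['\'']) = pvEsc cs := by
  unfold PySem.Chars.splitOn
  rw [go_eq_pvSp _ _ _ _ (by omega)]
  simp only [List.reverse_nil, List.nil_append]
  rw [join_pvSp]
  simp

theorem foldl_eq_pvEsc (cs : List Char) :
    cs.foldl (fun db c => db ++ (if c = '\'' then ['\'', '\''] else [c])) [] = pvEsc cs := by
  have h : ∀ (l init : List Char),
      l.foldl (fun db c => db ++ (if c = '\'' then ['\'', '\''] else [c])) init = init ++ pvEsc l := by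
    intro l
    induction l with
    | nil => simp [pvEsc]
    | cons c rest ih => intro init; simp [List.foldl, ih, pvEsc]
  simpa using h cs []

theorem pvEsc_of_no_quote (cs : List Char) (h : '\'' ∉ cs) : pvEsc cs = cs := by
  induction cs with
  | nil => rfl
  | cons c rest ih =>
    simp only [List.mem_cons, not_or] at h
    simp [pvEsc, Ne.symm h.1] at ih ⊢
    exact ih h.2

-- ===== VERDICT (by name: the statement is the Claim_ definition above) =====
theorem escape_single_quotes_spec : Claim_equal_escape_single_quotes := by
  intro x _
  unfold Spec_escape_single_quotes escape_single_quotes escape_single_quotes_alt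
  rw [join_splitOn]
  by_cases h : PySem.Str.isIn "'" x = false
  · rw [if_pos h]
    have hne : ¬ ['\''] <:+: x.toList := by
      have := PySem.Chars.isIn_eq_false_iff (sub := "'".toList) (s := x.toList)
      simp_all [PySem.Str.isIn]
    have hnm : '\'' ∉ x.toList := fun hm => hne ((List.singleton_infix_iff _ _).mpr hm)
    rw [pvEsc_of_no_quote _ hnm]
    exact String.ofList_toList.symm
  · rw [if_neg h, foldl_eq_pvEsc]
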